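-- pv_equiv track=rewrite | github.com/Dami-K1/Zadanka_APOK | Python/Operacje_String.py | zmien_znaki_na_poz
-- ===== SOURCE A (Python) =====
-- def zmien_znaki_na_poz(znaki, poz):
--     znaki_w = ""
--     iw = 1
--     for ch in znaki:
--         if ch == " ":
--             iw = 0
--         if iw == poz:
--             ch = ch.upper()
--         znaki_w = znaki_w + ch
--         iw = iw + 1
--     return znaki_w
-- ===== SOURCE B (Python) =====
-- def zmien_znaki_na_poz(znaki, poz):
--     parts = znaki.split(" ")
--     fixed = [
--         "".join(c.upper() if i == poz - 1 else c for i, c in enumerate(p))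
--         for p in parts
--     ]
--     return " ".join(fixed)
-- ===== Notes on version B (the rewrite author's own statement) =====
-- stated objective: simpler
-- what changed: Replaced A's single stateful scan with a per-character position counter reset at spaces by split(" ")/per-word uppercase-at-index/join(" "), which makes the 'position within each word' semantics explicit.
import Mathlib
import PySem

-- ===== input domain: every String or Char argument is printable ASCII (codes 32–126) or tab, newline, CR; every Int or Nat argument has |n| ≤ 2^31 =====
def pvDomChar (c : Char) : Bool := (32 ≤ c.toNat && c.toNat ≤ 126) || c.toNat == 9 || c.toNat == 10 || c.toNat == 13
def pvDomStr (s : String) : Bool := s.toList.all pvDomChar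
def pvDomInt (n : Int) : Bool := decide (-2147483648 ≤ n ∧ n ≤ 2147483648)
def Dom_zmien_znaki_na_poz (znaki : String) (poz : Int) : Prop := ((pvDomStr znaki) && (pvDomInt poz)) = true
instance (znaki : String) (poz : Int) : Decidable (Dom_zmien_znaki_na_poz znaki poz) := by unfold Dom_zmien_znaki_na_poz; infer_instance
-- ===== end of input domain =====

-- B replaces A's stateful per-character counter (reset at spaces) by split(" ") / per-word
-- uppercase-at-index poz-1 / join(" "): a plainer decomposition of the same task.

-- ===== PORT A =====
-- literal port of A: one left fold over the characters carrying (built string, counter iw)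
def zmien_znaki_na_poz (znaki : String) (poz : Int) : String :=
  String.ofList
    ((znaki.toList.foldl
      (fun (st : List Char × Int) ch =>
        let iw : Int := if ch = ' ' then 0 else st.2
        let ch' : Char := if iw = poz then PySem.Chars.upperChar ch else ch
        (st.1 ++ [ch'], iw + 1))
      ([], 1)).1)

-- ===== PORT B =====
-- per-word transform: uppercase the character whose 0-based index equals poz - 1
def pvFixWord (poz : Int) (w : List Char) : List Char :=
  (PySem.List.enumerate w).map
    (fun p => if p.1 = poz - 1 then PySem.Chars.upperChar p.2 else p.2)

def zmien_znaki_na_poz_alt (znaki : String) (poz : Int) : String :=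
  String.ofList
    (PySem.Chars.join [' ']
      ((PySem.Chars.splitOn znaki.toList [' ']).map (pvFixWord poz)))

-- ===== PRECONDITION & SPEC =====
def Spec_zmien_znaki_na_poz (znaki : String) (poz : Int) (out : String) : Prop := out = zmien_znaki_na_poz_alt znaki poz
instance (znaki : String) (poz : Int) (out : String) : Decidable (Spec_zmien_znaki_na_poz znaki poz out) := by unfold Spec_zmien_znaki_na_poz; infer_instance

-- ===== CLAIM (what is proved, stated in full; the proofs are below) =====
def Claim_equal_zmien_znaki_na_poz : Prop := ∀ (znaki : String) (poz : Int), Dom_zmien_znaki_na_poz znaki poz → Spec_zmien_znaki_na_poz znaki poz (zmien_znaki_na_poz znaki poz)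

-- ===== LEMMAS AND PROOFS =====

-- canonical recursion both ports are reduced to: counter i, reset to 1 after a space
def pvG (poz : Int) : Int → List Char → List Char
  | _, [] => []
  | i, c :: cs =>
    if c = ' ' then ' ' :: pvG poz 1 cs
    else (if i = poz then PySem.Chars.upperChar c else c) :: pvG poz (i + 1) cs

-- structural counterpart of splitOn _ [' ']
def pvSplit1 : List Char → List (List Char)
  | [] => [[]]
  | c :: cs =>
    if c = ' ' then [] :: pvSplit1 cs
    else match pvSplit1 cs with
      | [] => [[c]]
      | h :: t => (c :: h) :: t

def pvConsHeadL (pre : List Char) : List (List Char) → List (List Char)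
  | [] => [pre]
  | h :: t => (pre ++ h) :: t

lemma pvSplit1_ne_nil (cs : List Char) : pvSplit1 cs ≠ [] := by
  induction cs with
  | nil => simp [pvSplit1]
  | cons c cs ih =>
    simp only [pvSplit1]
    split_ifs
    · simp
    · cases h : pvSplit1 cs <;> simp

lemma pvConsHeadL_consHeadL (pre : List Char) (c : Char) (L : List (List Char)) :
    pvConsHeadL pre (pvConsHeadL [c] L) = pvConsHeadL (pre ++ [c]) L := by
  cases L <;> simp [pvConsHeadL]

lemma pvGo_spec (fuel : Nat) (l cur : List Char) (acc : List (List Char))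
    (h : l.length < fuel) :
    PySem.Chars.splitOn.go [' '] fuel l cur acc
      = acc.reverse ++ pvConsHeadL cur.reverse (pvSplit1 l) := by
  induction fuel generalizing l cur acc with
  | zero => omega
  | succ fuel ih =>
    cases l with
    | nil =>
      simp [PySem.Chars.splitOn.go, pvSplit1, pvConsHeadL]
    | cons c rest =>
      by_cases hc : c = ' '
      · subst hc
        have hp : List.isPrefixOf [' '] (' ' :: rest) = true := by
          simp [List.isPrefixOf]
        rw [PySem.Chars.splitOn.go]
        simp only [hp, if_pos]
        have hrest : rest.length < fuel := by simp at h; omega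
        rw [show List.drop (List.length [' ']) (' ' :: rest) = rest by simp]
        rw [ih rest [] (cur.reverse :: acc) hrest]
        have hne := pvSplit1_ne_nil rest
        cases hS : pvSplit1 rest with
        | nil => exact absurd hS hne
        | cons h t =>
          simp [pvSplit1, hS, pvConsHeadL]
      · have hp : List.isPrefixOf [' '] (c :: rest) = false := by
          simp [List.isPrefixOf]
          intro hh; exact absurd hh.symm hc
        rw [PySem.Chars.splitOn.go]
        simp only [hp]
        have hrest : rest.length < fuel := by simp at h; omega
        rw [if_neg (by simp)]
        rw [ih rest (c :: cur) acc hrest]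
        have : (c :: cur).reverse = cur.reverse ++ [c] := by simp
        rw [this, ← pvConsHeadL_consHeadL]
        simp only [pvSplit1, if_neg hc]
        cases hS : pvSplit1 rest <;> simp [pvConsHeadL]

lemma pvSplitOn_eq (cs : List Char) :
    PySem.Chars.splitOn cs [' '] = pvSplit1 cs := by
  rw [PySem.Chars.splitOn]
  rw [pvGo_spec (cs.length + 1) cs [] [] (by omega)]
  have hne := pvSplit1_ne_nil cs
  cases hS : pvSplit1 cs with
  | nil => exact absurd hS hne
  | cons h t => simp [pvConsHeadL]

lemma pvJoin_cons_head (sep : List Char) (x : Char) (xs : List Char) (ls : List (List Char)) :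
    PySem.Chars.join sep ((x :: xs) :: ls) = x :: PySem.Chars.join sep (xs :: ls) := by
  cases ls <;> simp [PySem.Chars.join, List.intercalate]

-- B side with a generalized counter for the (partial) head word
def pvJoinAux (poz i : Int) : List (List Char) → List Char
  | [] => []
  | h :: t =>
    PySem.Chars.join [' ']
      (((PySem.List.enumerate h (i - 1)).map
          (fun p => if p.1 = poz - 1 then PySem.Chars.upperChar p.2 else p.2)) :: t.map (pvFixWord poz))

lemma pvJoinAux_split1 (poz : Int) (cs : List Char) (i : Int) :
    pvJoinAux poz i (pvSplit1 cs) = pvG poz i cs := by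
  induction cs generalizing i with
  | nil =>
    simp [pvSplit1, pvJoinAux, pvG, PySem.List.enumerate_nil, PySem.Chars.join, List.intercalate]
  | cons c rest ih =>
    by_cases hc : c = ' '
    · subst hc
      rw [show pvSplit1 (' ' :: rest) = [] :: pvSplit1 rest from by simp [pvSplit1],
          show pvG poz i (' ' :: rest) = ' ' :: pvG poz 1 rest from by simp [pvG]]
      have hne := pvSplit1_ne_nil rest
      cases hS : pvSplit1 rest with
      | nil => exact absurd hS hne
      | cons h t =>
        have hstep : pvJoinAux poz i ([] :: h :: t)
            = ' ' :: pvJoinAux poz 1 (h :: t) := by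
          simp only [pvJoinAux, PySem.List.enumerate_nil, List.map_nil]
          have h1 : (1 : Int) - 1 = 0 := by omega
          rw [h1]
          simp [PySem.Chars.join, List.intercalate, pvFixWord]
        rw [hstep, ← hS, ih 1]
    · have hne := pvSplit1_ne_nil rest
      cases hS : pvSplit1 rest with
      | nil => exact absurd hS hne
      | cons h t =>
        rw [show pvSplit1 (c :: rest) = (c :: h) :: t from by
              simp only [pvSplit1, if_neg hc, hS],
            show pvG poz i (c :: rest)
                = (if i = poz then PySem.Chars.upperChar c else c) :: pvG poz (i + 1) rest from by
              simp [pvG, hc]]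
        have henum : PySem.List.enumerate (c :: h) (i - 1)
            = (i - 1, c) :: PySem.List.enumerate h i := by
          rw [PySem.List.enumerate_cons, show i - 1 + 1 = i from by omega]
        have hns : pvJoinAux poz i ((c :: h) :: t)
            = (if i - 1 = poz - 1 then PySem.Chars.upperChar c else c)
              :: pvJoinAux poz (i + 1) (h :: t) := by
          simp only [pvJoinAux, henum, List.map_cons]
          rw [pvJoin_cons_head, show i + 1 - 1 = i from by omega]
        rw [hns, ← hS, ih (i + 1)]
        by_cases hp : i = poz
        · rw [if_pos hp, if_pos (by omega)]
        · rw [if_neg hp, if_neg (by omega)]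

lemma pvB_eq_G (poz : Int) (cs : List Char) :
    PySem.Chars.join [' '] ((pvSplit1 cs).map (pvFixWord poz)) = pvG poz 1 cs := by
  have hne := pvSplit1_ne_nil cs
  cases hS : pvSplit1 cs with
  | nil => exact absurd hS hne
  | cons h t =>
    have hx : pvJoinAux poz 1 (h :: t)
        = PySem.Chars.join [' '] (pvFixWord poz h :: t.map (pvFixWord poz)) := by
      simp only [pvJoinAux]
      have h1 : (1 : Int) - 1 = 0 := by omega
      rw [h1]
      rfl
    rw [List.map_cons, ← hx, ← hS, pvJoinAux_split1]

lemma pvUpper_space : PySem.Chars.upperChar ' ' = ' ' := by decide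

lemma pvFoldA (poz : Int) (cs : List Char) :
    ∀ (acc : List Char) (i : Int),
      (cs.foldl
        (fun (st : List Char × Int) ch =>
          let iw : Int := if ch = ' ' then 0 else st.2
          let ch' : Char := if iw = poz then PySem.Chars.upperChar ch else ch
          (st.1 ++ [ch'], iw + 1))
        (acc, i)).1 = acc ++ pvG poz i cs := by
  induction cs with
  | nil => intro acc i; simp [pvG]
  | cons c rest ih =>
    intro acc i
    rw [List.foldl_cons]
    by_cases hc : c = ' '
    · subst hc
      dsimp only
      rw [if_pos rfl]
      have hch : (if (0 : Int) = poz then PySem.Chars.upperChar ' ' else ' ') = ' ' := by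
        split_ifs <;> simp [pvUpper_space]
      rw [hch, show (0 : Int) + 1 = 1 from by norm_num, ih (acc ++ [' ']) 1]
      simp [pvG]
    · dsimp only
      rw [if_neg hc, ih (acc ++ [if i = poz then PySem.Chars.upperChar c else c]) (i + 1)]
      simp [pvG, hc]

-- ===== VERDICT (by name: the statement is the Claim_ definition above) =====
theorem zmien_znaki_na_poz_spec : Claim_equal_zmien_znaki_na_poz := by
  intro znaki poz _
  unfold Spec_zmien_znaki_na_poz zmien_znaki_na_poz zmien_znaki_na_poz_alt
  rw [pvSplitOn_eq, pvB_eq_G]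
  rw [pvFoldA poz znaki.toList [] 1]
  simp
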